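-- pv_equiv track=rewrite | github.com/eklavyachamba/midsem | mylib.py | poly_eval
-- ===== SOURCE A (Python) =====
-- def poly_eval(coeffs, x):
--     # Evaluate polynomial and its first two derivatives at x
--     n = len(coeffs) - 1
--     p = coeffs[0]
--     dp = 0
--     ddp = 0
--     for i in range(1, n + 1):
--         ddp = ddp * x + 2 * dp
--         dp = dp * x + p
--         p = p * x + coeffs[i]
--     return p, dp, ddp
-- ===== SOURCE B (Python) =====
-- def poly_eval(coeffs, x):
--     # Differentiate symbolically first (coefficient lists, highest degree first),
--     # then evaluate the three polynomials with three independent Horner passes.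
--     n = len(coeffs) - 1
--     d1 = [c * k for c, k in zip(coeffs, range(n, 0, -1))]
--     d2 = [c * k for c, k in zip(d1, range(n - 1, 0, -1))]
--
--     def horner(cs):
--         v = 0
--         for c in cs:
--             v = v * x + c
--         return v
--
--     return horner(coeffs), horner(d1), horner(d2)
-- ===== Notes on version B (the rewrite author's own statement) =====
-- stated objective: alternative
-- what changed: A's single fused loop updating value/first/second derivative together is replaced by symbolic differentiation (building the two derivative coefficient lists via zip with a countdown range) followed by three independent Horner evaluations.
import Mathlib
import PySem

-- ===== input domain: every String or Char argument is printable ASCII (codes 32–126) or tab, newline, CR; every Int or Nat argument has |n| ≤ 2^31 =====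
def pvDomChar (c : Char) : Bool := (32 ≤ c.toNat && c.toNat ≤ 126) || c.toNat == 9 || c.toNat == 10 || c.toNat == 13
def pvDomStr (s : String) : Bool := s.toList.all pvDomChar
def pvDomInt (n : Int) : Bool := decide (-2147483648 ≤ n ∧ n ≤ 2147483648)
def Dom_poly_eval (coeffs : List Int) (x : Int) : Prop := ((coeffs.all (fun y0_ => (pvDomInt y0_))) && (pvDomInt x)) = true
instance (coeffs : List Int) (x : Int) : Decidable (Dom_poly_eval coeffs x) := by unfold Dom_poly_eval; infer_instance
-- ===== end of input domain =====

-- B replaces A's fused three-accumulator recurrence by symbolic differentiation of the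
-- coefficient lists followed by three independent Horner evaluations (objective: alternative).

-- ===== PORT A =====
def poly_eval (coeffs : List Int) (x : Int) : Int × Int × Int :=
  let n : Int := (coeffs.length : Int) - 1
  let p : Int := PySem.List.pyGetD coeffs 0 0
  (PySem.List.pyRange 1 (n + 1) 1).foldl
    (fun (st : Int × Int × Int) i =>
      (st.1 * x + PySem.List.pyGetD coeffs i 0,
       st.2.1 * x + st.1,
       st.2.2 * x + 2 * st.2.1))
    (p, 0, 0)

-- ===== PORT B =====
def poly_eval_alt (coeffs : List Int) (x : Int) : Int × Int × Int :=
  let n : Int := (coeffs.length : Int) - 1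
  let d1 : List Int := (coeffs.zip (PySem.List.pyRange n 0 (-1))).map (fun p => p.1 * p.2)
  let d2 : List Int := (d1.zip (PySem.List.pyRange (n - 1) 0 (-1))).map (fun p => p.1 * p.2)
  let horner : List Int → Int := fun cs => cs.foldl (fun v c => v * x + c) 0
  (horner coeffs, horner d1, horner d2)

-- ===== PRECONDITION & SPEC =====
-- Pre_ excludes only the empty coefficient list, on which A raises IndexError at coeffs[0].
def Pre_poly_eval (coeffs : List Int) (x : Int) : Prop := coeffs ≠ []
instance (coeffs : List Int) (x : Int) : Decidable (Pre_poly_eval coeffs x) := by unfold Pre_poly_eval; infer_instance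
def pvWitness_poly_eval : List Int × Int := ([1, 2, 3], 2)

def Spec_poly_eval (coeffs : List Int) (x : Int) (out : Int × Int × Int) : Prop := out = poly_eval_alt coeffs x
instance (coeffs : List Int) (x : Int) (out : Int × Int × Int) : Decidable (Spec_poly_eval coeffs x out) := by unfold Spec_poly_eval; infer_instance

-- ===== CLAIM (what is proved, stated in full; the proofs are below) =====
def Claim_equal_poly_eval : Prop := ∀ (coeffs : List Int) (x : Int), Dom_poly_eval coeffs x → Pre_poly_eval coeffs x → Spec_poly_eval coeffs x (poly_eval coeffs x)

-- ===== LEMMAS AND PROOFS =====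

def derivList : Nat → List Int → List Int
  | 0, _ => []
  | _ + 1, [] => []
  | m + 1, c :: t => c * ((m : Int) + 1) :: derivList m t

def hsum (x : Int) : List Int → Int
  | [] => 0
  | c :: t => c * x ^ t.length + hsum x t

theorem derivList_nil (m : Nat) : derivList m [] = [] := by cases m <;> rfl

theorem derivList_cons (c : Int) (t : List Int) (m : Nat) :
    derivList (m + 1) (c :: t) = c * ((m : Int) + 1) :: derivList m t := rfl

theorem hsum_cons (x a : Int) (l : List Int) :
    hsum x (a :: l) = a * x ^ l.length + hsum x l := rfl

theorem length_derivList (m : Nat) (cs : List Int) : (derivList m cs).length = min m cs.length := by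
  induction cs generalizing m with
  | nil => simp [derivList_nil]
  | cons c t ih =>
    cases m with
    | zero => simp [derivList]
    | succ k => simp only [derivList, List.length_cons, ih k]; omega

theorem key_d1 (x : Int) (cs : List Int) :
    hsum x (derivList cs.length cs) = hsum x (derivList (cs.length - 1) cs) * x + hsum x cs := by
  induction cs with
  | nil => simp [derivList, hsum]
  | cons c t ih =>
    cases t with
    | nil => simp [derivList, hsum]
    | cons b t' =>
      have hlen1 : (derivList (t'.length + 1) (b :: t')).length = t'.length + 1 := by
        rw [length_derivList]; simp
      have hlen0 : (derivList t'.length (b :: t')).length = t'.length := by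
        rw [length_derivList]; simp
      have ih' := ih
      simp only [List.length_cons, Nat.add_sub_cancel] at ih' ⊢
      rw [derivList_cons c (b :: t') (t'.length + 1), derivList_cons c (b :: t') t'.length,
          hsum_cons x (c * ((t'.length + 1 : Nat) + 1)) (derivList (t'.length + 1) (b :: t')),
          hsum_cons x (c * ((t'.length : Nat) + 1)) (derivList t'.length (b :: t')),
          hsum_cons x c (b :: t'), hlen1, hlen0, List.length_cons, ih']
      push_cast
      ring_nf

theorem key_d2 (x : Int) (cs : List Int) :
    hsum x (derivList (cs.length - 1) (derivList cs.length cs))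
      = hsum x (derivList (cs.length - 2) (derivList (cs.length - 1) cs)) * x
        + 2 * hsum x (derivList (cs.length - 1) cs) := by
  induction cs with
  | nil => simp [derivList, hsum]
  | cons c t ih =>
    cases t with
    | nil => simp [derivList, hsum]
    | cons b t' =>
      cases t' with
      | nil => simp [derivList, hsum]; ring
      | cons d t'' =>
        have ih' := ih
        simp only [List.length_cons, Nat.add_sub_cancel] at ih' ⊢
        have h3 : t''.length + 1 + 1 + 1 - 2 = t''.length + 1 := by omega
        have h4 : t''.length + 1 + 1 - 2 = t''.length := by omega
        rw [h3]
        rw [h4] at ih'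
        have e1 : (derivList (t''.length + 1) (derivList (t''.length + 1 + 1) (b :: d :: t''))).length
            = t''.length + 1 := by
          rw [length_derivList, length_derivList]; simp
        have e2 : (derivList t''.length (derivList (t''.length + 1) (b :: d :: t''))).length
            = t''.length := by
          rw [length_derivList, length_derivList]; simp
        have e3 : (derivList (t''.length + 1) (b :: d :: t'')).length = t''.length + 1 := by
          rw [length_derivList]; simp
        rw [derivList_cons c (b :: d :: t'') (t''.length + 1 + 1),
            derivList_cons (c * ((t''.length + 1 + 1 : Nat) + 1))
              (derivList (t''.length + 1 + 1) (b :: d :: t'')) (t''.length + 1),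
            derivList_cons c (b :: d :: t'') (t''.length + 1),
            derivList_cons (c * ((t''.length + 1 : Nat) + 1))
              (derivList (t''.length + 1) (b :: d :: t'')) t''.length]
        rw [hsum_cons x (c * ((t''.length + 1 + 1 : Nat) + 1) * ((t''.length + 1 : Nat) + 1))
              (derivList (t''.length + 1) (derivList (t''.length + 1 + 1) (b :: d :: t''))),
            hsum_cons x (c * ((t''.length + 1 : Nat) + 1) * ((t''.length : Nat) + 1))
              (derivList t''.length (derivList (t''.length + 1) (b :: d :: t''))),
            hsum_cons x (c * ((t''.length + 1 : Nat) + 1))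
              (derivList (t''.length + 1) (b :: d :: t'')),
            e1, e2, e3, ih']
        push_cast
        ring_nf

theorem derivList_append (m : Nat) (cs ys : List Int) (h : m ≤ cs.length) :
    derivList m (cs ++ ys) = derivList m cs := by
  induction cs generalizing m with
  | nil =>
    have : m = 0 := by simpa using h
    subst this; simp [derivList, derivList_nil]
  | cons c t ih =>
    cases m with
    | zero => rfl
    | succ k =>
      simp only [List.cons_append, derivList]
      rw [ih k (by simpa using h)]

theorem hsum_append_one (x : Int) (cs : List Int) (y : Int) :
    hsum x (cs ++ [y]) = hsum x cs * x + y := by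
  induction cs with
  | nil => simp [hsum]
  | cons c t ih =>
    simp only [List.cons_append, hsum, List.length_append, List.length_cons, List.length_nil, ih]
    ring_nf

theorem foldl_horner (x : Int) (cs : List Int) (a : Int) :
    cs.foldl (fun v c => v * x + c) a = a * x ^ cs.length + hsum x cs := by
  induction cs generalizing a with
  | nil => simp [hsum]
  | cons c t ih => simp only [List.foldl_cons, List.length_cons, ih, hsum]; ring_nf

theorem zip_countdown (cs : List Int) (m : Int) :
    (cs.zip (PySem.List.pyRange m 0 (-1))).map (fun p => p.1 * p.2) = derivList m.toNat cs := by
  induction cs generalizing m with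
  | nil => simp [derivList_nil]
  | cons c t ih =>
    by_cases hm : m ≤ 0
    · rw [PySem.List.pyRange_neg_one_eq_nil hm]
      have h0 : m.toNat = 0 := by omega
      simp [h0, derivList]
    · push_neg at hm
      rw [PySem.List.pyRange_neg_one_cons hm]
      have hk : m.toNat = (m - 1).toNat + 1 := by omega
      rw [hk]
      simp only [List.zip_cons_cons, List.map_cons, derivList, ih (m - 1)]
      have hc : (((m - 1).toNat : Int)) + 1 = m := by omega
      rw [hc]

def trip (x : Int) (cs : List Int) : Int × Int × Int :=
  (hsum x cs,
   hsum x (derivList (cs.length - 1) cs),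
   hsum x (derivList (cs.length - 2) (derivList (cs.length - 1) cs)))

theorem trip_step (x y : Int) (cs : List Int) :
    ((trip x cs).1 * x + y, (trip x cs).2.1 * x + (trip x cs).1,
     (trip x cs).2.2 * x + 2 * (trip x cs).2.1) = trip x (cs ++ [y]) := by
  unfold trip
  simp only [List.length_append, List.length_cons, List.length_nil, Nat.add_sub_cancel]
  have h1 : cs.length + 1 - 2 = cs.length - 1 := by omega
  rw [h1, derivList_append cs.length cs [y] (le_refl _), hsum_append_one, key_d1, key_d2]

theorem main_fold (x : Int) (ys cs : List Int) :
    ys.foldl (fun (st : Int × Int × Int) c =>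
        (st.1 * x + c, st.2.1 * x + st.1, st.2.2 * x + 2 * st.2.1)) (trip x cs)
      = trip x (cs ++ ys) := by
  induction ys generalizing cs with
  | nil => simp
  | cons y ys' ih =>
    rw [List.foldl_cons, trip_step, ih (cs ++ [y]), List.append_assoc]
    rfl

theorem trip_singleton (x c : Int) : trip x [c] = (c, 0, 0) := by
  simp [trip, derivList, hsum]

theorem A_eq_trip (c : Int) (rest : List Int) (x : Int) :
    poly_eval (c :: rest) x = trip x (c :: rest) := by
  unfold poly_eval
  simp only []
  have hn : ((c :: rest).length : Int) - 1 + 1 = (((c :: rest).length : Nat) : Int) := by ring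
  rw [hn]
  rw [PySem.List.foldl_pyRange_pyGetD' (c :: rest) 0
        (fun (st : Int × Int × Int) v =>
          (st.1 * x + v, st.2.1 * x + st.1, st.2.2 * x + 2 * st.2.1))
        (PySem.List.pyGetD (c :: rest) 0 0, 0, 0) (by norm_num)]
  have hp : PySem.List.pyGetD (c :: rest) 0 0 = c := by
    simp [PySem.List.pyGetD]
  rw [hp]
  have hd : List.drop (1 : Int).toNat (c :: rest) = rest := by simp
  rw [hd, ← trip_singleton x c, main_fold]
  rfl

theorem B_eq_trip (c : Int) (rest : List Int) (x : Int) :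
    poly_eval_alt (c :: rest) x = trip x (c :: rest) := by
  unfold poly_eval_alt
  simp only []
  rw [zip_countdown (c :: rest) (((c :: rest).length : Int) - 1)]
  have h1 : (((c :: rest).length : Int) - 1).toNat = rest.length := by simp
  rw [h1]
  rw [zip_countdown (derivList rest.length (c :: rest)) (((c :: rest).length : Int) - 1 - 1)]
  have h2 : (((c :: rest).length : Int) - 1 - 1).toNat = rest.length - 1 := by
    simp
  rw [h2]
  rw [foldl_horner, foldl_horner, foldl_horner]
  simp only [zero_mul, zero_add]
  unfold trip
  simp only [List.length_cons, Nat.add_sub_cancel]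
  have h3 : rest.length + 1 - 2 = rest.length - 1 := by omega
  rw [h3]

-- ===== VERDICT (by name: the statement is the Claim_ definition above) =====
theorem poly_eval_spec : Claim_equal_poly_eval := by
  intro coeffs x _ hpre
  unfold Spec_poly_eval
  cases coeffs with
  | nil => exact absurd rfl hpre
  | cons c rest => rw [A_eq_trip, B_eq_trip]
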